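-- pv_equiv track=rewrite | github.com/scoyer/FG2Seq | utils/utils_Ent_kvr.py | generate_entity_from_context
-- ===== SOURCE A (Python) =====
-- def generate_entity_from_context(context_arr, global_entity, entity_set, entity_type_set):
--     for sent in context_arr:
--         for entity in sent:
--             if entity in entity_set:
--                 continue
--             for k, v in global_entity.items():
--                 if entity in v:
--                     entity_set.append(entity)
--                     entity_type_set.append(k)
--                     break
--     return entity_set, entity_type_set
-- ===== SOURCE B (Python) =====
-- def generate_entity_from_context(context_arr, global_entity, entity_set, entity_type_set):
--     # Staged: reverse index entity->first key, flatten context, collect new entities, then map types.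
--     index = {}
--     for k, v in global_entity.items():
--         for e in v:
--             index.setdefault(e, k)
--     words = [w for sent in context_arr for w in sent]
--     seen = set(entity_set)
--     news = []
--     for w in words:
--         if w not in seen and w in index:
--             news.append(w)
--             seen.add(w)
--     return entity_set + news, entity_type_set + [index[w] for w in news]
-- ===== Notes on version B (the rewrite author's own statement) =====
-- stated objective: faster
-- what changed: Replaces A's per-word scan over all global_entity key/value lists and in-place appends by staged passes: a precomputed entity->first-key reverse index, a flattened word list, one flat collection pass of new entities with a membership set, and a final concatenation plus type lookup map.
import Mathlib
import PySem

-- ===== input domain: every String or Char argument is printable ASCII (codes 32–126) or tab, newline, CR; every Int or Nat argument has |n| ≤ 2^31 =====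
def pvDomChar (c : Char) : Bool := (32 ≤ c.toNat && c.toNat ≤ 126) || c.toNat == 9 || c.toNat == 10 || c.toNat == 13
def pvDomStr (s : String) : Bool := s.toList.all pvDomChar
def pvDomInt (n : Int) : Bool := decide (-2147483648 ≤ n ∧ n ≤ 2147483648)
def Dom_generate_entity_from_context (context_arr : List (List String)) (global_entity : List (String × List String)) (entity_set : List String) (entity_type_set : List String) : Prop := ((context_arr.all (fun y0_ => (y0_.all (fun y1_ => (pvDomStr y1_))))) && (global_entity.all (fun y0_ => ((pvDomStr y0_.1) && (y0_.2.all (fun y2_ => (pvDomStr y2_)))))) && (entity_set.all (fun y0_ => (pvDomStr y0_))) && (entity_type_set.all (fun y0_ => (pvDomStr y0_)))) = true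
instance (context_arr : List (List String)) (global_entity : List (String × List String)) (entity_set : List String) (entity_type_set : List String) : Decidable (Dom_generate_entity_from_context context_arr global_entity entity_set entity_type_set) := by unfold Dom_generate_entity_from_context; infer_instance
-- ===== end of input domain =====

-- B replaces A's per-word scan of all global_entity entries by staged passes: a precomputed
-- entity->first-key index, a flattened word list, one flat collection pass with a membership set,
-- then a final concatenation and type-lookup map (faster in a timing run). Python A appends
-- to entity_set/entity_type_set in place while B builds fresh lists; the equivalence proved here
-- is about the return value only.
-- ===== PORT A =====
-- first key of global_entity (in order) whose value list contains `entity`; the inner `for k, v ... break` loop of A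
def scanA (entity : String) (ge : List (String × List String)) : Option String :=
  match ge with
  | [] => none
  | (k, v) :: rest => if entity ∈ v then some k else scanA entity rest

def stepA (ge : List (String × List String)) (st : List String × List String) (entity : String) : List String × List String :=
  if entity ∈ st.1 then st
  else
    match scanA entity ge with
    | some k => (st.1 ++ [entity], st.2 ++ [k])
    | none => st

def generate_entity_from_context (context_arr : List (List String)) (global_entity : List (String × List String)) (entity_set : List String) (entity_type_set : List String) : List String × List String :=
  context_arr.foldl (fun st sent => sent.foldl (stepA global_entity) st) (entity_set, entity_type_set)

-- ===== PORT B =====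
-- reverse index: entity -> first key whose value list contains it (Source B's `index.setdefault(e, k)` loop)
def buildIndex (ge : List (String × List String)) : PySem.Dict String String :=
  ge.foldl (fun d kv => kv.2.foldl (fun d e => d.setdefault e kv.1) d) PySem.Dict.empty

-- Source B's collection loop body: `if w not in seen and w in index: news.append(w); seen.add(w)`
def collectStep (index : PySem.Dict String String) (st : List String × PySem.Set String) (w : String) : List String × PySem.Set String :=
  if PySem.Set.contains st.2 w then st
  else if index.contains w then (st.1 ++ [w], PySem.Set.add st.2 w) else st

def generate_entity_from_context_alt (context_arr : List (List String)) (global_entity : List (String × List String)) (entity_set : List String) (entity_type_set : List String) : List String × List String :=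
  let index := buildIndex global_entity
  let words := context_arr.flatMap (fun sent => sent)
  let news := (words.foldl (collectStep index) ([], PySem.Set.ofList entity_set)).1
  -- `index[w]` cannot miss for w ∈ news (collectStep checked membership); getD "" is that lookup
  (entity_set ++ news, entity_type_set ++ news.map (fun w => (index.get? w).getD ""))

-- ===== PRECONDITION & SPEC =====
def Spec_generate_entity_from_context (context_arr : List (List String)) (global_entity : List (String × List String)) (entity_set : List String) (entity_type_set : List String) (out : List String × List String) : Prop := out = generate_entity_from_context_alt context_arr global_entity entity_set entity_type_set
instance (context_arr : List (List String)) (global_entity : List (String × List String)) (entity_set : List String) (entity_type_set : List String) (out : List String × List String) : Decidable (Spec_generate_entity_from_context context_arr global_entity entity_set entity_type_set out) := by unfold Spec_generate_entity_from_context; infer_instance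

-- ===== CLAIM (what is proved, stated in full; the proofs are below) =====
def Claim_equal_generate_entity_from_context : Prop := ∀ (context_arr : List (List String)) (global_entity : List (String × List String)) (entity_set : List String) (entity_type_set : List String), Dom_generate_entity_from_context context_arr global_entity entity_set entity_type_set → Spec_generate_entity_from_context context_arr global_entity entity_set entity_type_set (generate_entity_from_context context_arr global_entity entity_set entity_type_set)

-- ===== LEMMAS AND PROOFS =====

-- proof-side recursive form of B's collection fold
def collectR (index : PySem.Dict String String) : List String → PySem.Set String → List String
  | [], _ => []
  | w :: rest, seen =>
    if PySem.Set.contains seen w then collectR index rest seen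
    else if index.contains w then w :: collectR index rest (PySem.Set.add seen w)
    else collectR index rest seen

lemma foldl_collectStep (index : PySem.Dict String String) :
    ∀ (ws : List String) (acc : List String) (seen : PySem.Set String),
      (ws.foldl (collectStep index) (acc, seen)).1 = acc ++ collectR index ws seen := by
  intro ws
  induction ws with
  | nil => intro acc seen; simp [collectR]
  | cons w rest ih =>
    intro acc seen
    simp only [List.foldl_cons, collectStep, collectR]
    by_cases h1 : w ∈ seen
    · simp [PySem.Set.contains, h1, ih]
    · by_cases h2 : index.contains w = true
      · simp [PySem.Set.contains, h1, h2, ih]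
      · simp [PySem.Set.contains, h1, h2, ih]

-- one value list's setdefault fold: lookup is the old lookup, else `some k` iff the list contains w
lemma buildIndex_inner (k : String) (v : List String) (d : PySem.Dict String String) (w : String) :
    (v.foldl (fun d e => d.setdefault e k) d).get? w
      = match d.get? w with
        | some x => some x
        | none => if w ∈ v then some k else none := by
  induction v generalizing d with
  | nil => cases h : d.get? w <;> simp [h]
  | cons e rest ih =>
    simp only [List.foldl_cons]
    rw [ih]
    by_cases hw : w = e
    · subst hw
      rw [PySem.Dict.get?_setdefault_self]
      cases h : d.get? w with
      | some x => simp
      | none => simp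
    · rw [PySem.Dict.get?_setdefault_of_ne _ _ hw]
      cases h : d.get? w with
      | some x => simp
      | none => simp [hw]

lemma buildIndex_get (ge : List (String × List String)) (w : String) :
    (buildIndex ge).get? w = scanA w ge := by
  unfold buildIndex
  suffices h : ∀ (d : PySem.Dict String String),
      (ge.foldl (fun d kv => kv.2.foldl (fun d e => d.setdefault e kv.1) d) d).get? w
        = match d.get? w with
          | some x => some x
          | none => scanA w ge by
    rw [h PySem.Dict.empty]; simp [PySem.Dict.get?_empty]
  induction ge with
  | nil => intro d; cases h : d.get? w <;> simp [scanA, h]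
  | cons kv rest ih =>
    intro d
    simp only [List.foldl_cons]
    rw [ih, buildIndex_inner kv.1 kv.2 d w]
    cases h : d.get? w with
    | some x => simp
    | none => by_cases hv : w ∈ kv.2 <;> simp [scanA, hv]

-- A's nested fold over sentences is the flat fold over the flattened word list
lemma foldA_flat (ge : List (String × List String)) :
    ∀ (ctx : List (List String)) (st : List String × List String),
      ctx.foldl (fun st sent => sent.foldl (stepA ge) st) st
        = (ctx.flatMap (fun sent => sent)).foldl (stepA ge) st := by
  intro ctx
  induction ctx with
  | nil => intro st; simp
  | cons sent rest ih => intro st; simp [List.foldl_append, ih]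

-- the flat A fold produces exactly old lists ++ collected new entities / their types
lemma foldA_eq_collect (index : PySem.Dict String String) (ge : List (String × List String))
    (hidx : ∀ w, index.get? w = scanA w ge) :
    ∀ (ws : List String) (es ets : List String) (seen : PySem.Set String),
      (∀ w : String, w ∈ seen ↔ w ∈ es) →
      ws.foldl (stepA ge) (es, ets)
        = (es ++ collectR index ws seen,
           ets ++ (collectR index ws seen).map (fun w => (index.get? w).getD "")) := by
  intro ws
  induction ws with
  | nil => intro es ets seen _; simp [collectR]
  | cons w rest ih =>
    intro es ets seen hmem
    simp only [List.foldl_cons, collectR]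
    by_cases hs : PySem.Set.contains seen w = true
    · have hwes : w ∈ es := (hmem w).mp (by simpa [PySem.Set.contains] using hs)
      rw [if_pos hs]
      have : stepA ge (es, ets) w = (es, ets) := by simp [stepA, hwes]
      rw [this]; exact ih es ets seen hmem
    · have hwes : w ∉ es := fun c => hs (by simpa [PySem.Set.contains] using (hmem w).mpr c)
      rw [if_neg hs]
      have hcont : index.contains w = ((index.get? w).isSome) := PySem.Dict.contains_eq_isSome_get? ..
      cases hg : scanA w ge with
      | some k =>
        have hig : index.get? w = some k := by rw [hidx, hg]
        have hc : index.contains w = true := by rw [hcont, hig]; rfl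
        rw [if_pos hc]
        have : stepA ge (es, ets) w = (es ++ [w], ets ++ [k]) := by simp [stepA, hwes, hg]
        rw [this, ih (es ++ [w]) (ets ++ [k]) (PySem.Set.add seen w)
          (by intro x; simp [PySem.Set.mem_add, hmem, List.mem_append])]
        simp [hig, List.append_assoc]
      | none =>
        have hig : index.get? w = none := by rw [hidx, hg]
        have hc : ¬ index.contains w = true := by rw [hcont, hig]; simp
        rw [if_neg hc]
        have : stepA ge (es, ets) w = (es, ets) := by simp [stepA, hwes, hg]
        rw [this]; exact ih es ets seen hmem

-- ===== VERDICT (by name: the statement is the Claim_ definition above) =====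
theorem generate_entity_from_context_spec : Claim_equal_generate_entity_from_context := by
  intro ctx ge es ets _
  unfold Spec_generate_entity_from_context generate_entity_from_context generate_entity_from_context_alt
  simp only [foldl_collectStep, List.nil_append]
  rw [foldA_flat, foldA_eq_collect (buildIndex ge) ge (buildIndex_get ge)
    (ctx.flatMap (fun sent => sent)) es ets (PySem.Set.ofList es)
    (fun w => PySem.Set.mem_ofList es w)]
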